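-- pv_equiv track=rewrite | github.com/grand-roman/algorithms_yandex | sprint_2/greedy/F.py | func
-- ===== SOURCE A (Python) =====
-- def func(mas,rows,columns):
--   res = 0
--   if rows <= 1:
--     return 0
--   if columns == 0:
--     return 0
--   for column in range(columns):
--     for row in range(1, rows):
--       if mas[row][column] < mas[row - 1][column]:
--         res += 1
--         break
--   return(res)
-- ===== SOURCE B (Python) =====
-- def func(mas, rows, columns):
--     if columns <= 0:
--         return 0
--     bad = set()
--     for row in range(1, rows):
--         for column in range(columns):
--             if mas[row][column] < mas[row - 1][column]:
--                 bad.add(column)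
--     return len(bad)
-- ===== Notes on version B (the rewrite author's own statement) =====
-- stated objective: alternative
-- what changed: Row-major single sweep that accumulates the set of offending columns (no per-column early break), returning the set's size, instead of A's column-major nested loops with break.
-- outside the precondition, e.g. on func([[1], [0], []], 3, 1): A returns 1, B raises IndexError
import Mathlib
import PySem

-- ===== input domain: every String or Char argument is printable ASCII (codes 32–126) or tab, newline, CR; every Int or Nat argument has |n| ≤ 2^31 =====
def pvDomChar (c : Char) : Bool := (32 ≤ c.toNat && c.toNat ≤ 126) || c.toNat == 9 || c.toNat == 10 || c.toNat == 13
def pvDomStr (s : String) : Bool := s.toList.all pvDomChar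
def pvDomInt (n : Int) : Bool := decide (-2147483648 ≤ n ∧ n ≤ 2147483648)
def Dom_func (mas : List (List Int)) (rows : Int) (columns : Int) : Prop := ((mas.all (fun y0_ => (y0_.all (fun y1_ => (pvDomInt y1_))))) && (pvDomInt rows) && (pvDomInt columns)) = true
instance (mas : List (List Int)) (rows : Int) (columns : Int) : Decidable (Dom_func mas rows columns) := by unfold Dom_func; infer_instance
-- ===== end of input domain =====

-- B replaces A's column-major scan with per-column break by a row-major sweep that
-- accumulates the set of offending columns and returns its size (alternative decomposition, same cost).


-- ===== PORT A =====
-- shared total indexing helper: mas[r][c]; exact under Pre_func (all accessed indices in range)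
def pvGet (mas : List (List Int)) (r c : Int) : Int :=
  PySem.List.pyGetD (PySem.List.pyGetD mas r []) c 0

-- A's inner 'for row in range(1, rows): … break' as structural recursion over the row indices
def funcInner (mas : List (List Int)) (column : Int) : List Int → Bool
  | [] => false
  | row :: rest =>
    if pvGet mas row column < pvGet mas (row - 1) column then true
    else funcInner mas column rest

def func (mas : List (List Int)) (rows : Int) (columns : Int) : Int :=
  if rows ≤ 1 then 0
  else if columns = 0 then 0
  else
    (PySem.List.pyRange 0 columns 1).foldl
      (fun res column =>
        if funcInner mas column (PySem.List.pyRange 1 rows 1) then res + 1 else res) 0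

-- ===== PORT B =====
def func_alt (mas : List (List Int)) (rows : Int) (columns : Int) : Int :=
  if columns ≤ 0 then 0
  else
  let bad : PySem.Set Int :=
    (PySem.List.pyRange 1 rows 1).foldl
      (fun bad row =>
        (PySem.List.pyRange 0 columns 1).foldl
          (fun bad column =>
            if pvGet mas row column < pvGet mas (row - 1) column then PySem.Set.add bad column
            else bad) bad)
      PySem.Set.empty
  PySem.Set.len bad

-- ===== PRECONDITION & SPEC =====
-- Pre_func excludes exactly the inputs on which Python raises IndexError: rows exceeding len(mas)
-- or some accessed row shorter than columns (on ragged inputs A's early break can still return; see cites).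
def Pre_func (mas : List (List Int)) (rows : Int) (columns : Int) : Prop :=
  rows ≤ 1 ∨ columns ≤ 0 ∨
    (rows ≤ mas.length ∧ ∀ row ∈ mas.take rows.toNat, columns ≤ (row.length : Int))
instance (mas : List (List Int)) (rows : Int) (columns : Int) : Decidable (Pre_func mas rows columns) := by unfold Pre_func; infer_instance

def pvWitness_func : List (List Int) × Int × Int := ([[1, 2], [0, 3]], 2, 2)

def Spec_func (mas : List (List Int)) (rows : Int) (columns : Int) (out : Int) : Prop := out = func_alt mas rows columns
instance (mas : List (List Int)) (rows : Int) (columns : Int) (out : Int) : Decidable (Spec_func mas rows columns out) := by unfold Spec_func; infer_instance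

-- ===== CLAIM (what is proved, stated in full; the proofs are below) =====
def Claim_equal_func : Prop := ∀ (mas : List (List Int)) (rows : Int) (columns : Int), Dom_func mas rows columns → Pre_func mas rows columns → Spec_func mas rows columns (func mas rows columns)

-- ===== LEMMAS AND PROOFS =====

-- the violation test both programs share
def pvV (mas : List (List Int)) (r c : Int) : Bool := decide (pvGet mas r c < pvGet mas (r - 1) c)

theorem funcInner_eq_any (mas : List (List Int)) (c : Int) (l : List Int) :
    funcInner mas c l = l.any (fun r => pvV mas r c) := by
  induction l with
  | nil => rfl
  | cons r rest ih =>
    simp only [funcInner, ih, List.any_cons, pvV]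
    split_ifs with h <;> simp [h]

theorem mem_innerFold (mas : List (List Int)) (r : Int) (cl : List Int) (s : PySem.Set Int) (y : Int) :
    y ∈ cl.foldl (fun bad column =>
        if pvGet mas r column < pvGet mas (r - 1) column then PySem.Set.add bad column else bad) s
      ↔ y ∈ s ∨ (y ∈ cl ∧ pvV mas r y = true) := by
  induction cl generalizing s with
  | nil => simp
  | cons c rest ih =>
    simp only [List.foldl_cons, ih]
    by_cases h : pvGet mas r c < pvGet mas (r - 1) c
    · simp [h, PySem.Set.mem_add, pvV]
      constructor
      · rintro ((hs | rfl) | hr)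
        · exact Or.inl hs
        · exact Or.inr ⟨Or.inl rfl, h⟩
        · exact Or.inr ⟨Or.inr hr.1, hr.2⟩
      · rintro (hs | ⟨(rfl | hr), hv⟩)
        · exact Or.inl (Or.inl hs)
        · exact Or.inl (Or.inr rfl)
        · exact Or.inr ⟨hr, hv⟩
    · simp [h, pvV]
      constructor
      · rintro (hs | hr)
        · exact Or.inl hs
        · exact Or.inr ⟨Or.inr hr.1, hr.2⟩
      · rintro (hs | ⟨(rfl | hr), hv⟩)
        · exact Or.inl hs
        · exact absurd hv h
        · exact Or.inr ⟨hr, hv⟩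

theorem nodup_innerFold (mas : List (List Int)) (r : Int) (cl : List Int) (s : PySem.Set Int)
    (hs : s.Nodup) :
    (cl.foldl (fun bad column =>
        if pvGet mas r column < pvGet mas (r - 1) column then PySem.Set.add bad column else bad) s).Nodup := by
  induction cl generalizing s with
  | nil => exact hs
  | cons c rest ih =>
    simp only [List.foldl_cons]
    apply ih
    split_ifs
    · exact PySem.Set.nodup_add s c hs
    · exact hs

theorem mem_outerFold (mas : List (List Int)) (cl rl : List Int) (s : PySem.Set Int) (y : Int) :
    y ∈ rl.foldl (fun bad row =>
        cl.foldl (fun bad column =>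
          if pvGet mas row column < pvGet mas (row - 1) column then PySem.Set.add bad column else bad) bad) s
      ↔ y ∈ s ∨ (y ∈ cl ∧ ∃ r ∈ rl, pvV mas r y = true) := by
  induction rl generalizing s with
  | nil => simp
  | cons r rest ih =>
    simp only [List.foldl_cons, ih, mem_innerFold]
    constructor
    · rintro ((hs | hc) | hr)
      · exact Or.inl hs
      · exact Or.inr ⟨hc.1, r, List.mem_cons_self, hc.2⟩
      · exact Or.inr ⟨hr.1, hr.2.choose, List.mem_cons_of_mem _ hr.2.choose_spec.1, hr.2.choose_spec.2⟩
    · rintro (hs | ⟨hc, r', hr', hv⟩)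
      · exact Or.inl (Or.inl hs)
      · rcases List.mem_cons.mp hr' with rfl | hr'
        · exact Or.inl (Or.inr ⟨hc, hv⟩)
        · exact Or.inr ⟨hc, r', hr', hv⟩

theorem nodup_outerFold (mas : List (List Int)) (cl rl : List Int) (s : PySem.Set Int)
    (hs : s.Nodup) :
    (rl.foldl (fun bad row =>
        cl.foldl (fun bad column =>
          if pvGet mas row column < pvGet mas (row - 1) column then PySem.Set.add bad column else bad) bad) s).Nodup := by
  induction rl generalizing s with
  | nil => exact hs
  | cons r rest ih => exact ih _ (nodup_innerFold mas r cl s hs)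

theorem pyRange_nil_of_le (a b : Int) (h : b ≤ a) : PySem.List.pyRange a b 1 = [] := by
  simp [PySem.List.pyRange]; omega

theorem nodup_colList (columns : Int) : (PySem.List.pyRange 0 columns 1).Nodup := by
  by_cases h : columns ≤ 0
  · rw [pyRange_nil_of_le 0 columns h]; exact List.nodup_nil
  · have hc : columns = ((columns.toNat : Nat) : Int) := by omega
    rw [hc, PySem.List.pyRange_zero_natCast]
    exact List.Nodup.map (fun a b h => by exact_mod_cast h) List.nodup_range

-- B's value equals the count of columns with some violating row
theorem func_alt_eq_countP (mas : List (List Int)) (rows columns : Int) :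
    func_alt mas rows columns =
      ((PySem.List.pyRange 0 columns 1).countP
        (fun c => (PySem.List.pyRange 1 rows 1).any (fun r => pvV mas r c)) : Int) := by
  unfold func_alt
  by_cases hc : columns ≤ 0
  · rw [if_pos hc, pyRange_nil_of_le 0 columns hc]
    simp
  rw [if_neg hc]
  set cl := PySem.List.pyRange 0 columns 1 with hcl
  set rl := PySem.List.pyRange 1 rows 1 with hrl
  set bad := rl.foldl (fun bad row =>
      cl.foldl (fun bad column =>
        if pvGet mas row column < pvGet mas (row - 1) column then PySem.Set.add bad column else bad) bad)
      PySem.Set.empty with hbad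
  have hnd : bad.Nodup := nodup_outerFold mas cl rl PySem.Set.empty List.nodup_nil
  have hmem : ∀ y, y ∈ bad ↔ y ∈ cl.filter (fun c => rl.any (fun r => pvV mas r c)) := by
    intro y
    rw [hbad, mem_outerFold]
    simp [List.mem_filter, List.any_eq_true]
  have hperm : bad.Perm (cl.filter (fun c => rl.any (fun r => pvV mas r c))) :=
    (List.perm_ext_iff_of_nodup hnd ((nodup_colList columns).filter _)).mpr hmem
  simp [PySem.Set.len, hperm.length_eq, List.countP_eq_length_filter]

theorem func_eq_func_alt (mas : List (List Int)) (rows columns : Int) :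
    func mas rows columns = func_alt mas rows columns := by
  rw [func_alt_eq_countP]
  unfold func
  split_ifs with h1 h2
  · rw [pyRange_nil_of_le 1 rows h1]
    simp
  · rw [h2]
    simp [PySem.List.pyRange]
  · have : ∀ (l : List Int),
        l.foldl (fun res column =>
          if funcInner mas column (PySem.List.pyRange 1 rows 1) then res + 1 else res) 0
        = (l.countP (fun c => (PySem.List.pyRange 1 rows 1).any (fun r => pvV mas r c)) : Int) := by
      intro l
      have := PySem.List.foldl_count_if
        (fun column => funcInner mas column (PySem.List.pyRange 1 rows 1)) l 0
      rw [this]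
      simp only [funcInner_eq_any]
      omega
    exact this _

-- ===== VERDICT (by name: the statement is the Claim_ definition above) =====
theorem func_spec : Claim_equal_func := by
  intro mas rows columns _ _
  unfold Spec_func
  exact func_eq_func_alt mas rows columns
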